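-- pv_equiv track=rewrite | github.com/deng-YH/GenPredict | src/cnn.py | seq_to_OneHot
-- ===== SOURCE A (Python) =====
-- def seq_to_OneHot(seq: str):
--     # ---------得到ATGC的所有的3联组合列表----------
--     labels_K_mer = []
--     ATGC = ['A', 'T', 'G', 'C']
--     for i in ATGC:
--         for j in ATGC:
--             for k in ATGC:
--                 labels_K_mer.append(str(i) + str(j) + str(k))
--
--     # ----------将序列转换成K_mer编码 K = 3---------
--     k = 3
--     list_comb = []
--     for index in range(len(seq)):
--         t = seq[index:index + k]
--         if (len(t)) == k:
--             list_comb.append(t)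
--
--     # -------K_mer编码转换成one—hot编码------------
--     data = list_comb
--     ind_to_char = labels_K_mer
--     # 定义字符到整数的映射
--     char_to_int = dict((c, i) for i, c in enumerate(ind_to_char))  # 枚举
--     int_to_char = dict((i, c) for i, c in enumerate(ind_to_char))
--     # 整数编码
--     integer_encoded = [char_to_int[char] for char in data]
--     # one-hot编码
--     one_hot_encoded = list()
--     for value in integer_encoded:
--         letter = [0 for _ in range(len(ind_to_char))]  # one-hot编码长度
--         letter[value] = 1
--         one_hot_encoded.append(letter)
--     return one_hot_encoded
-- ===== SOURCE B (Python) =====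
-- def seq_to_OneHot(seq: str):
--     base = {'A': 0, 'T': 1, 'G': 2, 'C': 3}
--     rows = []
--     for i in range(len(seq)):
--         w = seq[i:i + 3]
--         if len(w) == 3:
--             row = [0] * 64
--             row[16 * base[w[0]] + 4 * base[w[1]] + base[w[2]]] = 1
--             rows.append(row)
--     return rows
-- ===== Notes on version B (the rewrite author's own statement) =====
-- stated objective: simpler
-- what changed: Drops the 64-entry 3-mer table and both enumerate/dict passes; a single loop computes each window's one-hot index directly as the base-4 positional value 16*b[w0]+4*b[w1]+b[w2] of a fixed per-base map and writes the row in place.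
import Mathlib
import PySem

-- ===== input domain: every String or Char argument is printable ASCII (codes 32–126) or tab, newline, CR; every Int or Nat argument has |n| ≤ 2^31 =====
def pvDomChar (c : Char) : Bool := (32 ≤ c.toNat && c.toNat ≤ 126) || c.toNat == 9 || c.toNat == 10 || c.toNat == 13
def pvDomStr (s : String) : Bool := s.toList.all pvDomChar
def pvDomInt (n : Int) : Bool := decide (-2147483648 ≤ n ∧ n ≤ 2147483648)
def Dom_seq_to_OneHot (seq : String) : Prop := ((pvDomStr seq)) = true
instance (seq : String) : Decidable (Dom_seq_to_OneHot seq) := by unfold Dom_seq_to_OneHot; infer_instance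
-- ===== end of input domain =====

-- B replaces A's 64-entry 3-mer table and enumerate/dict passes by a direct base-4
-- index computation per window (objective: simpler, one pass).

-- ===== PORT A =====
def pvATGC : List Char := ['A', 'T', 'G', 'C']

-- str(i)+str(j)+str(k) on single characters = the three-character string (exact)
def pvLabels : List String :=
  pvATGC.foldl (fun acc i =>
    pvATGC.foldl (fun acc2 j =>
      pvATGC.foldl (fun acc3 k => acc3 ++ [String.ofList [i, j, k]]) acc2) acc) []

def seq_to_OneHot (seq : String) : List (List Int) :=
  let labels_K_mer := pvLabels
  let k : Int := 3
  let list_comb : List String :=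
    (PySem.List.pyRange 0 (PySem.Str.len seq) 1).foldl (fun acc index =>
      let t := PySem.Str.slice seq (some index) (some (index + k))
      if PySem.Str.len t == k then acc ++ [t] else acc) []
  -- dict((c, i) for i, c in enumerate(ind_to_char)); int_to_char is built by A but never used
  let char_to_int : PySem.Dict String Int :=
    PySem.Dict.ofList ((PySem.List.enumerate labels_K_mer).map (fun p => (p.2, p.1)))
  -- char_to_int[char]: KeyError (lookup misses) is excluded by Pre_, so getD is never the default
  let integer_encoded : List Int := list_comb.map (fun c => (char_to_int.get? c).getD 0)
  integer_encoded.foldl (fun acc value =>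
    let letter : List Int := (List.range labels_K_mer.length).map (fun _ => 0)
    -- letter[value] = 1: under Pre_ value is a dict index 0..63, in range
    acc ++ [PySem.List.pySetD letter value 1]) []

-- ===== PORT B =====
def pvBaseDict : PySem.Dict Char Int :=
  PySem.Dict.ofList [('A', 0), ('T', 1), ('G', 2), ('C', 3)]

-- base[w[i]]: the index i is in range (len w = 3) and KeyError is excluded by Pre_
def pvBaseAt (w : String) (i : Int) : Int :=
  (pvBaseDict.get? ((PySem.Str.pyGet? w i).getD ' ')).getD 0

def seq_to_OneHot_alt (seq : String) : List (List Int) :=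
  (PySem.List.pyRange 0 (PySem.Str.len seq) 1).foldl (fun rows i =>
    let w := PySem.Str.slice seq (some i) (some (i + 3))
    if PySem.Str.len w == 3 then
      let idx := 16 * pvBaseAt w 0 + 4 * pvBaseAt w 1 + pvBaseAt w 2
      -- row[idx] = 1: idx is 0..63, in range
      rows ++ [PySem.List.pySetD (List.replicate 64 (0 : Int)) idx 1]
    else rows) []

-- ===== PRECONDITION & SPEC =====
-- Pre_ excludes exactly the sequences on which A raises KeyError: a character outside
-- 'ATGC' occurring in a string long enough to have a full 3-character window.
def Pre_seq_to_OneHot (seq : String) : Prop :=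
  seq.toList.length < 3 ∨ (seq.toList.all (fun c => pvATGC.contains c)) = true
instance (seq : String) : Decidable (Pre_seq_to_OneHot seq) := by
  unfold Pre_seq_to_OneHot; infer_instance

def pvWitness_seq_to_OneHot : String := "ATGC"

def Spec_seq_to_OneHot (seq : String) (out : List (List Int)) : Prop := out = seq_to_OneHot_alt seq
instance (seq : String) (out : List (List Int)) : Decidable (Spec_seq_to_OneHot seq out) := by unfold Spec_seq_to_OneHot; infer_instance

-- ===== CLAIM (what is proved, stated in full; the proofs are below) =====
def Claim_equal_seq_to_OneHot : Prop := ∀ (seq : String), Dom_seq_to_OneHot seq → Pre_seq_to_OneHot seq → Spec_seq_to_OneHot seq (seq_to_OneHot seq)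

-- ===== LEMMAS AND PROOFS =====

-- A's one-hot row for the window with characters c0 c1 c2 (via the 3-mer dict) equals
-- B's (via base-4 arithmetic): 64 concrete cases.
set_option maxRecDepth 2048 in
lemma pvRow_eq : ∀ c0 ∈ pvATGC, ∀ c1 ∈ pvATGC, ∀ c2 ∈ pvATGC,
    PySem.List.pySetD ((List.range pvLabels.length).map (fun _ => (0 : Int)))
      (((PySem.Dict.ofList ((PySem.List.enumerate pvLabels).map (fun p => (p.2, p.1)))).get?
        (String.ofList [c0, c1, c2])).getD 0) 1 =
    PySem.List.pySetD (List.replicate 64 (0 : Int))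
      (16 * pvBaseAt (String.ofList [c0, c1, c2]) 0 + 4 * pvBaseAt (String.ofList [c0, c1, c2]) 1 +
        pvBaseAt (String.ofList [c0, c1, c2]) 2) 1 := by
  intro c0 h0 c1 h1 c2 h2
  fin_cases h0 <;> fin_cases h1 <;> fin_cases h2 <;> decide

lemma pvWindow_chars (cs : List Char) (j : Nat) (h : (List.take 3 (List.drop j cs)).length = 3) :
    ∃ c0 c1 c2, List.take 3 (List.drop j cs) = [c0, c1, c2] ∧
      c0 ∈ cs ∧ c1 ∈ cs ∧ c2 ∈ cs := by
  obtain ⟨c0, c1, c2, hw⟩ := List.length_eq_three.mp h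
  have hmem : ∀ c ∈ ([c0, c1, c2] : List Char), c ∈ cs := by
    intro c hc
    rw [← hw] at hc
    exact List.mem_of_mem_drop (List.mem_of_mem_take hc)
  exact ⟨c0, c1, c2, hw, hmem c0 (by simp), hmem c1 (by simp), hmem c2 (by simp)⟩

set_option maxRecDepth 8192 in
theorem seq_to_OneHot_spec : Claim_equal_seq_to_OneHot := by
  intro seq _ hpre
  unfold Spec_seq_to_OneHot seq_to_OneHot seq_to_OneHot_alt
  simp only [PySem.List.foldl_append_if, PySem.List.foldl_append_singleton_eq_map,
    List.map_map, List.nil_append]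
  apply List.map_congr_left
  intro i hi
  have hmem := List.mem_filter.mp hi
  have hrange := PySem.List.mem_pyRange_one.mp hmem.1
  have hlen : PySem.Str.len (PySem.Str.slice seq (some i) (some (i + 3))) = 3 := by
    have := hmem.2
    simpa using this
  -- i = (j : Nat)
  obtain ⟨j, rfl⟩ : ∃ j : Nat, i = (j : Int) := ⟨i.toNat, (Int.toNat_of_nonneg hrange.1).symm⟩
  have htl : (PySem.Str.slice seq (some (j : Int)) (some ((j : Int) + 3))).toList
      = List.take 3 (List.drop j seq.toList) := by
    have : ((j : Int) + 3) = ((j : Int) + ((3 : Nat) : Int)) := by norm_num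
    rw [PySem.Str.toList_slice, PySem.Chars.slice_eq_listSlice, this,
      PySem.List.slice_natCast_add]
  have hlen3 : (List.take 3 (List.drop j seq.toList)).length = 3 := by
    rw [PySem.Str.len_eq, htl] at hlen
    exact_mod_cast hlen
  obtain ⟨c0, c1, c2, hw, h0, h1, h2⟩ := pvWindow_chars seq.toList j hlen3
  -- Pre_ gives ATGC membership: the window exists, so the length is ≥ 3
  have hall : ∀ c ∈ seq.toList, c ∈ pvATGC := by
    rcases hpre with hshort | hall
    · exfalso
      rw [List.length_take, List.length_drop] at hlen3
      omega
    · intro c hc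
      have := List.all_eq_true.mp hall c hc
      simpa [List.contains_iff_mem] using this
  have hweq : PySem.Str.slice seq (some (j : Int)) (some ((j : Int) + 3))
      = String.ofList [c0, c1, c2] := by
    apply String.toList_inj.mp
    rw [htl, hw]; simp
  simp only [Function.comp_apply]
  rw [hweq]
  exact pvRow_eq c0 (hall c0 h0) c1 (hall c1 h1) c2 (hall c2 h2)
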